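-- pv_equiv track=rewrite | github.com/Aidankeogh/deep_rapm | common_utils.py | player_to_stub_name
-- ===== SOURCE A (Python) =====
-- def player_to_stub_name(player_name):
--     if player_name is None:
--         return
--     characters_to_wipe = " .'-,*"
--     player_name_stub = player_name
--     for c in characters_to_wipe:
--         player_name_stub = player_name_stub.replace(c, "")
--     return player_name_stub.lower()
-- ===== SOURCE B (Python) =====
-- def player_to_stub_name(player_name):
--     if player_name is None:
--         return
--     return "".join(c for c in player_name if c not in " .'-,*").lower()
-- ===== Notes on version B (the rewrite author's own statement) =====
-- stated objective: simpler
-- what changed: Replaces the six sequential full-string .replace passes with one filtering pass over the input characters followed by a single .lower().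
import Mathlib
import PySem

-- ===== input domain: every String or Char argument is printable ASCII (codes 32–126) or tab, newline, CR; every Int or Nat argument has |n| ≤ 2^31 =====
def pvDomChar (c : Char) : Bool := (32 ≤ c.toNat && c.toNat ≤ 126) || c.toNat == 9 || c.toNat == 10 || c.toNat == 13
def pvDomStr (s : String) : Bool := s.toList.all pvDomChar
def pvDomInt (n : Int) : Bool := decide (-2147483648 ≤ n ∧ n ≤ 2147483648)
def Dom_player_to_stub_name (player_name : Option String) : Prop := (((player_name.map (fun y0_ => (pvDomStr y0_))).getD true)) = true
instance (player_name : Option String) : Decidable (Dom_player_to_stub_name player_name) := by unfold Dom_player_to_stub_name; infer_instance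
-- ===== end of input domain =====

-- B replaces A's six sequential .replace passes by one filtering pass over the characters (objective: simpler).

-- ===== PORT A =====
-- for c in " .'-,*": stub = stub.replace(c, "") ; then stub.lower()
def player_to_stub_name (player_name : Option String) : Option String :=
  match player_name with
  | none => none
  | some name =>
      let characters_to_wipe := " .'-,*"
      let player_name_stub :=
        characters_to_wipe.toList.foldl
          (fun s c => PySem.Str.replace s (String.ofList [c]) "") name
      some (PySem.Str.lower player_name_stub)

-- ===== PORT B =====
-- "".join(c for c in player_name if c not in " .'-,*").lower()
def player_to_stub_name_alt (player_name : Option String) : Option String :=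
  match player_name with
  | none => none
  | some name =>
      some (PySem.Str.lower
        (String.ofList (name.toList.filter (fun c => !(" .'-,*".toList.contains c)))))

-- ===== PRECONDITION & SPEC =====
def Spec_player_to_stub_name (player_name : Option String) (out : Option String) : Prop := out = player_to_stub_name_alt player_name
instance (player_name : Option String) (out : Option String) : Decidable (Spec_player_to_stub_name player_name out) := by unfold Spec_player_to_stub_name; infer_instance

-- ===== CLAIM (what is proved, stated in full; the proofs are below) =====
def Claim_equal_player_to_stub_name : Prop := ∀ (player_name : Option String), Dom_player_to_stub_name player_name → Spec_player_to_stub_name player_name (player_to_stub_name player_name)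

-- ===== LEMMAS AND PROOFS =====

-- replace.go with a single-character pattern and empty replacement is a filter
theorem pv_go_single (c : Char) : ∀ (l : List Char) (fuel : Nat) (acc : List Char),
    l.length ≤ fuel →
    PySem.Chars.replace.go [c] [] fuel l acc
      = acc.reverse ++ l.filter (fun x => !(x == c)) := by
  intro l
  induction l with
  | nil =>
      intro fuel acc _
      cases fuel <;> simp [PySem.Chars.replace.go]
  | cons a t ih =>
      intro fuel acc h
      cases fuel with
      | zero => simp at h
      | succ fuel =>
        rw [PySem.Chars.replace.go]
        by_cases hac : a = c
        · subst hac
          simp only [List.isPrefixOf, BEq.rfl, Bool.and_self, List.isPrefixOf_nil_left,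
            if_pos]
          have := ih fuel acc (by simpa using Nat.le_of_succ_le_succ h)
          simpa [List.filter] using this
        · have hb : ([c].isPrefixOf (a :: t)) = false := by
            simp [List.isPrefixOf, hac]
            intro hh; exact absurd hh.symm hac
          rw [hb]
          simp only [Bool.false_eq_true, if_false]
          have := ih fuel (a :: acc) (by simpa using Nat.le_of_succ_le_succ h)
          rw [this]
          have hne : (a == c) = false := by simp [hac]
          simp [List.filter, hne]

theorem pv_replace_single (c : Char) (cs : List Char) :
    PySem.Chars.replace cs [c] [] = cs.filter (fun x => !(x == c)) := by
  rw [PySem.Chars.replace]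
  simp only [List.isEmpty, Bool.false_eq_true, if_false]
  simpa using pv_go_single c cs cs.length [] le_rfl

-- folding single-char replaces over a wipe list filters out its members
theorem pv_fold_filter (ws : List Char) : ∀ (cs : List Char),
    ws.foldl (fun l c => PySem.Chars.replace l [c] []) cs
      = cs.filter (fun x => !(ws.contains x)) := by
  induction ws with
  | nil => intro cs; simp
  | cons w ws ih =>
      intro cs
      simp only [List.foldl_cons]
      rw [pv_replace_single, ih, List.filter_filter]
      apply List.filter_congr
      intro x _
      by_cases hx : x = w <;> simp [hx, List.contains_cons]

-- the string-level fold seen through toList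
theorem pv_fold_toList (ws : List Char) : ∀ (s : String),
    (ws.foldl (fun s c => PySem.Str.replace s (String.ofList [c]) "") s).toList
      = ws.foldl (fun l c => PySem.Chars.replace l [c] []) s.toList := by
  induction ws with
  | nil => intro s; rfl
  | cons w ws ih =>
      intro s
      simp only [List.foldl_cons]
      rw [ih]
      congr 1
      rw [PySem.Str.toList_replace]
      simp

-- two strings with equal character lists have equal .lower()
theorem pv_lower_congr (s t : String) (h : s.toList = t.toList) :
    PySem.Str.lower s = PySem.Str.lower t := by
  unfold PySem.Str.lower
  rw [h]

-- ===== VERDICT (by name: the statement is the Claim_ definition above) =====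
theorem player_to_stub_name_spec : Claim_equal_player_to_stub_name := by
  intro player_name _
  unfold Spec_player_to_stub_name
  cases player_name with
  | none => rfl
  | some name =>
      simp only [player_to_stub_name, player_to_stub_name_alt]
      refine congrArg some (pv_lower_congr _ _ ?_)
      rw [pv_fold_toList, pv_fold_filter]
      simp
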